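-- pv_equiv track=rewrite | github.com/wilmurillo-ai/Design-Assistant | .skills/openclaw-skills/skills/modeioai/privacy-protector/modeio_redact/workflow/file_handlers.py | _find_replacement_spans
-- ===== SOURCE A (Python) =====
-- from typing import Any, Iterable, List, Sequence, Tuple
--
-- def _find_replacement_spans(
--     text: str,
--     replacements: Sequence[Tuple[str, str]],
-- ) -> List[Tuple[int, int, str]]:
--     spans: List[Tuple[int, int, str]] = []
--
--     candidates = [(source, target) for source, target in replacements if source]
--     candidates.sort(key=lambda item: len(item[0]), reverse=True)
--
--     for source, target in candidates:
--         search_from = 0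
--         while True:
--             start = text.find(source, search_from)
--             if start < 0:
--                 break
--             end = start + len(source)
--             search_from = start + 1
--             if any(start < existing_end and end > existing_start for existing_start, existing_end, _ in spans):
--                 continue
--             spans.append((start, end, target))
--
--     spans.sort(key=lambda item: (item[0], item[1]))
--     return spans
-- ===== SOURCE B (Python) =====
-- def _find_replacement_spans(text, replacements):
--     spans = []  # invariant: sorted by start, pairwise non-overlapping
--
--     candidates = [(source, target) for source, target in replacements if source]
--     candidates.sort(key=lambda item: len(item[0]), reverse=True)
--
--     for source, target in candidates:
--         n = len(source)
--         # collect every occurrence start of `source`, in increasing order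
--         occs = []
--         s = text.find(source)
--         while s >= 0:
--             occs.append(s)
--             s = text.find(source, s + 1)
--         # single merge pass: old spans are consumed left to right, never rescanned
--         merged = []
--         j = 0  # index of the first old span not yet moved into `merged`
--         for s in occs:
--             e = s + n
--             while j < len(spans) and spans[j][1] <= s:
--                 merged.append(spans[j])
--                 j += 1
--             if (j == len(spans) or e <= spans[j][0]) and (not merged or merged[-1][1] <= s):
--                 merged.append((s, e, target))
--         merged.extend(spans[j:])
--         spans = merged
--     return spans
-- ===== Notes on version B (the rewrite author's own statement) =====
-- stated objective: faster
-- what changed: Per source B first collects all occurrence starts, then does one merge pass that consumes the sorted accepted-span list left to right with a pointer (testing each occurrence only against the next old span and the last merged span), producing the new sorted list directly, so A's inner any() scan over all spans per occurrence and A's final sort both disappear.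
import Mathlib
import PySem

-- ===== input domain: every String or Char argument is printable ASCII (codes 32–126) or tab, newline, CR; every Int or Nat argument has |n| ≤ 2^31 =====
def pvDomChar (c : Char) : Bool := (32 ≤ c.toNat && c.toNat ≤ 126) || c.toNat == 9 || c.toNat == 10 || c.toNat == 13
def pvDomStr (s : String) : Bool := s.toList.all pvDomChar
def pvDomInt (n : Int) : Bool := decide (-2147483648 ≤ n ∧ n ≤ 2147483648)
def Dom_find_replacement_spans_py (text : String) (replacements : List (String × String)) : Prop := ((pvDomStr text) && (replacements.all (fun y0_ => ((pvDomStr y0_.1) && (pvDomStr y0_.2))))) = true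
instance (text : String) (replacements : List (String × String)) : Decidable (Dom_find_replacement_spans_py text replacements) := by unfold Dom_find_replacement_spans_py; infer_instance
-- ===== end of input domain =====

-- B replaces A's per-occurrence any() scan over all accepted spans (and A's final sort) by,
-- per source, one occurrence-collection pass followed by one merge pass that consumes the
-- sorted accepted-span list left to right with a pointer; measured much faster, equality proved.

-- ===== PORT A =====
-- any(start < existing_end and end > existing_start for existing_start, existing_end, _ in spans)
def aOverlap (spans : List (Int × Int × String)) (start end_ : Int) : Bool :=
  spans.any (fun e => decide (start < e.2.1) && decide (end_ > e.1))

-- A's 'while True' search loop; fuel only makes the recursion total (sf grows strictly and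
-- stays ≤ len(text), so fuel = len(text)+2 is never exhausted on the actual calls)
def aLoop (text source : List Char) (target : String) (fuel : Nat)
    (spans : List (Int × Int × String)) (sf : Nat) : List (Int × Int × String) :=
  match fuel with
  | 0 => spans
  | Nat.succ fuel =>
    let start := PySem.Chars.findFrom text source (sf : Int) none
    if start < 0 then spans
    else
      let end_ := start + (source.length : Int)
      let sf' := start.toNat + 1
      if aOverlap spans start end_ then
        aLoop text source target fuel spans sf'
      else
        aLoop text source target fuel (spans ++ [(start, end_, target)]) sf'

def find_replacement_spans_py (text : String) (replacements : List (String × String)) : List (Int × Int × String) :=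
  let candidates := PySem.List.sorted (replacements.filter (fun p => !(p.1 == ""))) (fun p => PySem.Str.len p.1) true
  let spans := candidates.foldl (fun spans p => aLoop text.toList p.1.toList p.2 (text.toList.length + 2) spans 0) []
  PySem.List.sorted2 spans (fun x => x.1) (fun x => x.2.1) false

-- ===== PORT B =====
-- inner while of the merge pass: move old spans whose end ≤ s from spans[j:] into merged
def bCopy (spans : List (Int × Int × String)) (s : Int) (j : Nat)
    (merged : List (Int × Int × String)) : Nat × List (Int × Int × String) :=
  if _h : j < spans.length ∧ (spans.getD j (0, 0, "")).2.1 ≤ s then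
    bCopy spans s (j + 1) (merged ++ [spans.getD j (0, 0, "")])
  else (j, merged)
termination_by spans.length - j
decreasing_by omega

-- body of 'for s in occs' in the merge pass (merged[-1] ported via getLast?)
def bStep (spans : List (Int × Int × String)) (n : Int) (target : String)
    (st : Nat × List (Int × Int × String)) (s : Int) : Nat × List (Int × Int × String) :=
  let e := s + n
  let jm := bCopy spans s st.1 st.2
  if ((jm.1 == spans.length) || decide (e ≤ (spans.getD jm.1 (0, 0, "")).1))
      && (match jm.2.getLast? with | none => true | some q => decide (q.2.1 ≤ s)) then
    (jm.1, jm.2 ++ [(s, e, target)])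
  else jm

-- 'while s >= 0: occs.append(s); s = text.find(source, s + 1)'  (fuel for totality only)
def bCollect (text source : List Char) (fuel : Nat) (occs : List Int) (s : Int) : List Int :=
  match fuel with
  | 0 => occs
  | Nat.succ fuel =>
    if s < 0 then occs
    else bCollect text source fuel (occs ++ [s]) (PySem.Chars.findFrom text source (s + 1) none)

-- one candidate (source, target): collect all occurrence starts, then one merge pass
def bSource (text : List Char) (spans : List (Int × Int × String)) (source : List Char)
    (target : String) : List (Int × Int × String) :=
  let occs := bCollect text source (text.length + 2) [] (PySem.Chars.find text source)
  let st := occs.foldl (bStep spans (source.length : Int) target) (0, [])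
  st.2 ++ spans.drop st.1

def find_replacement_spans_py_alt (text : String) (replacements : List (String × String)) : List (Int × Int × String) :=
  let candidates := PySem.List.sorted (replacements.filter (fun p => !(p.1 == ""))) (fun p => PySem.Str.len p.1) true
  candidates.foldl (fun spans p => bSource text.toList spans p.1.toList p.2) []

-- ===== PRECONDITION & SPEC =====
def Spec_find_replacement_spans_py (text : String) (replacements : List (String × String)) (out : List (Int × Int × String)) : Prop := out = find_replacement_spans_py_alt text replacements
instance (text : String) (replacements : List (String × String)) (out : List (Int × Int × String)) : Decidable (Spec_find_replacement_spans_py text replacements out) := by unfold Spec_find_replacement_spans_py; infer_instance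

-- ===== CLAIM (what is proved, stated in full; the proofs are below) =====
def Claim_equal_find_replacement_spans_py : Prop := ∀ (text : String) (replacements : List (String × String)), Dom_find_replacement_spans_py text replacements → Spec_find_replacement_spans_py text replacements (find_replacement_spans_py text replacements)

-- ===== LEMMAS AND PROOFS =====

-- sorted-nonoverlapping-wellformed span lists
def SNO (l : List (Int × Int × String)) : Prop :=
  l.Pairwise (fun p q => p.2.1 ≤ q.1) ∧ ∀ p ∈ l, p.1 < p.2.1

-- relation maintained between A's span list `as` and B's `bs`
def SpanInv (as bs : List (Int × Int × String)) : Prop := bs.Perm as ∧ SNO bs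

-- all occurrence starts of `source` in `text`, increasing
def occL (text source : List Char) : List Nat :=
  (List.range text.length).filter (fun i => decide (source <+: text.drop i))

def occsFrom (text source : List Char) (k : Nat) : List Nat :=
  (occL text source).filter (fun i => decide (k ≤ i))

-- the body of A's while-loop as a step over one occurrence start
def Astep (n : Nat) (target : String) (as : List (Int × Int × String)) (s : Nat) :
    List (Int × Int × String) :=
  if aOverlap as (s : Int) ((s : Int) + (n : Int)) then as
  else as ++ [((s : Int), (s : Int) + (n : Int), target)]

theorem occL_pairwise (text source : List Char) : (occL text source).Pairwise (· < ·) := by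
  exact (List.pairwise_lt_range).filter _

theorem occ_lt_length (text source : List Char) (hs : source ≠ []) (i : Nat)
    (h : source <+: text.drop i) : i < text.length := by
  have hlen := h.length_le
  rw [List.length_drop] at hlen
  have : 0 < source.length := List.length_pos_iff.mpr hs
  omega

theorem mem_occL (text source : List Char) (hs : source ≠ []) (i : Nat) :
    i ∈ occL text source ↔ source <+: text.drop i := by
  unfold occL
  rw [List.mem_filter, List.mem_range]
  constructor
  · intro ⟨_, h⟩; exact of_decide_eq_true h
  · intro h; exact ⟨occ_lt_length text source hs i h, decide_eq_true h⟩


theorem filter_ge_eq_cons {l : List Nat} (hl : l.Pairwise (· < ·)) {m k : Nat}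
    (hm : m ∈ l) (hkm : k ≤ m) (hmin : ∀ x ∈ l, k ≤ x → m ≤ x) :
    l.filter (fun i => decide (k ≤ i)) = m :: l.filter (fun i => decide (m + 1 ≤ i)) := by
  induction l with
  | nil => cases hm
  | cons a t ih =>
    rw [List.pairwise_cons] at hl
    rcases List.mem_cons.mp hm with heq | hm'
    · subst heq
      have h1 : t.filter (fun i => decide (m ≤ i)) = t := by
        apply List.filter_eq_self.mpr
        intro x hx
        have := hl.1 x hx
        simp; omega
      have h1' : t.filter (fun i => decide (k ≤ i)) = t := by
        apply List.filter_eq_self.mpr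
        intro x hx
        have := hl.1 x hx
        simp; omega
      have h2 : t.filter (fun i => decide (m + 1 ≤ i)) = t := by
        apply List.filter_eq_self.mpr
        intro x hx
        have := hl.1 x hx
        simp; omega
      simp only [List.filter_cons, decide_eq_true hkm, if_true]
      have hnm : (decide (m + 1 ≤ m) : Bool) = false := by simp
      rw [hnm]
      simp only [Bool.false_eq_true, if_neg, not_false_iff]
      rw [h1', h2]
    · have ham : a < m := List.rel_of_pairwise_cons (List.pairwise_cons.mpr hl) hm'
      have hak : ¬ k ≤ a := by
        intro hka
        exact absurd (hmin a (List.mem_cons_self ..) hka) (by omega)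
      have ham1 : ¬ m + 1 ≤ a := by omega
      simp only [List.filter_cons]
      rw [decide_eq_false hak, decide_eq_false ham1]
      simp only [Bool.false_eq_true, if_neg, not_false_iff]
      exact ih hl.2 hm' (fun x hx hkx => hmin x (List.mem_cons_of_mem _ hx) hkx)

-- characterisation of findFrom in terms of occsFrom
theorem find_char (text source : List Char) (hs : source ≠ []) (k : Nat) (hk : k ≤ text.length) :
    (PySem.Chars.findFrom text source (k : Int) none < 0 → occsFrom text source k = []) ∧
    (0 ≤ PySem.Chars.findFrom text source (k : Int) none →
      (PySem.Chars.findFrom text source (k : Int) none).toNat < text.length ∧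
      k ≤ (PySem.Chars.findFrom text source (k : Int) none).toNat ∧
      occsFrom text source k =
        (PySem.Chars.findFrom text source (k : Int) none).toNat ::
          occsFrom text source ((PySem.Chars.findFrom text source (k : Int) none).toNat + 1)) := by
  constructor
  · intro hneg
    have heq : PySem.Chars.findFrom text source (k : Int) none = -1 := by
      have h1 := PySem.Chars.findFrom_natCast text source k hk
      have h2 := PySem.Chars.neg_one_le_find (text.drop k) source
      split at h1 <;> omega
    have hnin := (PySem.Chars.findFrom_natCast_eq_neg_one_iff text source k hk).mp heq
    unfold occsFrom
    apply List.filter_eq_nil_iff.mpr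
    intro i hi
    simp only [decide_eq_true_eq]
    intro hki
    apply hnin
    have hpre := (mem_occL text source hs i).mp hi
    have : text.drop i = (text.drop k).drop (i - k) := by
      rw [List.drop_drop]; congr 1; omega
    rw [this] at hpre
    exact hpre.isInfix.trans (List.drop_suffix _ _).isInfix
  · intro hpos
    have hne : PySem.Chars.findFrom text source (k : Int) none ≠ -1 := by omega
    obtain ⟨hkr, hpre, hmin⟩ := PySem.Chars.findFrom_natCast_spec text source k hk hne
    set r := PySem.Chars.findFrom text source (k : Int) none with hr
    have hmlt : r.toNat < text.length := occ_lt_length text source hs r.toNat hpre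
    have hkm : k ≤ r.toNat := by omega
    refine ⟨hmlt, hkm, ?_⟩
    unfold occsFrom
    apply filter_ge_eq_cons (occL_pairwise text source)
      ((mem_occL text source hs r.toNat).mpr hpre) hkm
    intro x hx hkx
    by_contra hcon
    exact hmin x (by omega) (by omega) ((mem_occL text source hs x).mp hx)

-- A's loop is the fold of Astep over the occurrence list
theorem aLoop_eq (text source : List Char) (target : String) (hs : source ≠ []) :
    ∀ (fuel k : Nat) (as : List (Int × Int × String)), k ≤ text.length →
      (occsFrom text source k).length < fuel →
      aLoop text source target fuel as k =
        (occsFrom text source k).foldl (Astep source.length target) as := by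
  intro fuel
  induction fuel with
  | zero => intro k as _ h; omega
  | succ fuel ih =>
    intro k as hk hlen
    obtain ⟨hnegc, hposc⟩ := find_char text source hs k hk
    rw [aLoop]
    by_cases hneg : PySem.Chars.findFrom text source (k : Int) none < 0
    · rw [if_pos hneg, hnegc hneg]
      rfl
    · rw [if_neg hneg]
      obtain ⟨hmlt, hkm, hcons⟩ := hposc (by omega)
      set r := PySem.Chars.findFrom text source (k : Int) none with hr
      have hrcast : r = (r.toNat : Int) := by omega
      have hlen' : (occsFrom text source (r.toNat + 1)).length < fuel := by
        rw [hcons] at hlen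
        simp at hlen
        omega
      have hk' : r.toNat + 1 ≤ text.length := by omega
      rw [hcons, List.foldl_cons]
      show (if aOverlap as r (r + (source.length : Int)) then
              aLoop text source target fuel as (r.toNat + 1)
            else
              aLoop text source target fuel (as ++ [(r, r + (source.length : Int), target)]) (r.toNat + 1))
          = (occsFrom text source (r.toNat + 1)).foldl (Astep source.length target)
              (Astep source.length target as r.toNat)
      unfold Astep
      rw [← hrcast]
      by_cases hov : aOverlap as r (r + (source.length : Int)) = true
      · rw [if_pos hov, if_pos hov]
        exact ih (r.toNat + 1) as hk' hlen'
      · rw [if_neg hov, if_neg hov]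
        exact ih (r.toNat + 1) _ hk' hlen'

-- B's collector produces exactly the occurrence list
theorem bCollect_eq (text source : List Char) (hs : source ≠ []) :
    ∀ (fuel k : Nat) (acc : List Int), k ≤ text.length →
      (occsFrom text source k).length < fuel →
      bCollect text source fuel acc (PySem.Chars.findFrom text source (k : Int) none) =
        acc ++ (occsFrom text source k).map (fun (i : Nat) => (i : Int)) := by
  intro fuel
  induction fuel with
  | zero => intro k acc _ h; omega
  | succ fuel ih =>
    intro k acc hk hlen
    obtain ⟨hnegc, hposc⟩ := find_char text source hs k hk
    rw [bCollect]
    by_cases hneg : PySem.Chars.findFrom text source (k : Int) none < 0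
    · rw [if_pos hneg, hnegc hneg]
      simp
    · rw [if_neg hneg]
      obtain ⟨hmlt, hkm, hcons⟩ := hposc (by omega)
      set r := PySem.Chars.findFrom text source (k : Int) none with hr
      have hrcast : r = (r.toNat : Int) := by omega
      have hlen' : (occsFrom text source (r.toNat + 1)).length < fuel := by
        rw [hcons] at hlen
        simp at hlen
        omega
      have hk' : r.toNat + 1 ≤ text.length := by omega
      have harg : r + 1 = ((r.toNat + 1 : Nat) : Int) := by omega
      rw [harg]
      rw [ih (r.toNat + 1) (acc ++ [r]) hk' hlen']
      rw [hcons]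
      simp [← hrcast]

theorem bCopy_spec (bs : List (Int × Int × String)) (s : Int) :
    ∀ (c j : Nat) (merged : List (Int × Int × String)), bs.length - j ≤ c → j ≤ bs.length →
      j ≤ (bCopy bs s j merged).1 ∧ (bCopy bs s j merged).1 ≤ bs.length ∧
      (bCopy bs s j merged).2 ++ bs.drop (bCopy bs s j merged).1 = merged ++ bs.drop j ∧
      (∀ p ∈ (bCopy bs s j merged).2, p ∈ merged ∨ p.2.1 ≤ s) ∧
      ((bCopy bs s j merged).1 < bs.length → s < (bs.getD (bCopy bs s j merged).1 (0, 0, "")).2.1) := by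
  intro c
  induction c with
  | zero =>
    intro j merged hc hj
    have hj' : j = bs.length := by omega
    rw [bCopy]
    have hcond : ¬ (j < bs.length ∧ (bs.getD j (0, 0, "")).2.1 ≤ s) := by
      intro h; omega
    rw [dif_neg hcond]
    exact ⟨le_refl _, by omega, rfl, fun p hp => Or.inl hp, fun h => absurd h (by omega)⟩
  | succ c ih =>
    intro j merged hc hj
    rw [bCopy]
    by_cases hcond : (j < bs.length ∧ (bs.getD j (0, 0, "")).2.1 ≤ s)
    · rw [dif_pos hcond]
      obtain ⟨h1, h2, h3, h4, h5⟩ := ih (j + 1) (merged ++ [bs.getD j (0, 0, "")]) (by omega) (by omega)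
      refine ⟨by omega, h2, ?_, ?_, h5⟩
      · rw [h3]
        rw [List.getD_eq_getElem bs _ hcond.1]
        rw [List.append_assoc]
        congr 1
        exact (List.drop_eq_getElem_cons hcond.1).symm
      · intro p hp
        rcases h4 p hp with hmem | hle
        · rcases List.mem_append.mp hmem with h' | h'
          · exact Or.inl h'
          · right
            rw [List.mem_singleton.mp h']
            exact hcond.2
        · exact Or.inr hle
    · rw [dif_neg hcond]
      refine ⟨le_refl _, hj, rfl, fun p hp => Or.inl hp, ?_⟩
      intro hlt
      have hlt' : j < bs.length := hlt
      show s < (bs.getD j (0, 0, "")).2.1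
      rcases not_and_or.mp hcond with h' | h'
      · exact absurd hlt' h'
      · omega

theorem end_le_getLast (l : List (Int × Int × String)) (h : SNO l) (p : Int × Int × String)
    (hp : p ∈ l) (hne : l ≠ []) : p.2.1 ≤ (l.getLast hne).2.1 := by
  obtain ⟨hpair, hwf⟩ := h
  obtain ⟨i, hi, rfl⟩ := List.getElem_of_mem hp
  rw [List.getLast_eq_getElem]
  rw [List.pairwise_iff_getElem] at hpair
  rcases Nat.lt_or_ge i (l.length - 1) with hlt | hge
  · have h1 := hpair i (l.length - 1) hi (by omega) hlt
    have h2 := hwf l[l.length - 1] (l.getElem_mem (by omega))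
    omega
  · have : i = l.length - 1 := by omega
    subst this; exact le_refl _

theorem head_start_le (q : Int × Int × String) (t : List (Int × Int × String))
    (h : SNO (q :: t)) (p : Int × Int × String) (hp : p ∈ q :: t) : q.1 ≤ p.1 := by
  obtain ⟨hpair, hwf⟩ := h
  rcases List.mem_cons.mp hp with rfl | hp'
  · exact le_refl _
  · have h1 := List.rel_of_pairwise_cons hpair hp'
    have h2 := hwf q (List.mem_cons_self ..)
    omega

-- one occurrence: B's merge step agrees with A's overlap-test-and-append step
theorem step_core (bs : List (Int × Int × String)) (n : Nat) (hn : 1 ≤ n) (target : String)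
    (m : Nat) (as merged : List (Int × Int × String)) (j : Nat) (hj : j ≤ bs.length)
    (hperm : (merged ++ bs.drop j).Perm as) (hsno : SNO (merged ++ bs.drop j))
    (hb : ∀ p ∈ merged, p.1 < (m : Int)) :
    (bStep bs (n : Int) target (j, merged) (m : Int)).1 ≤ bs.length ∧
    ((bStep bs (n : Int) target (j, merged) (m : Int)).2 ++
        bs.drop (bStep bs (n : Int) target (j, merged) (m : Int)).1).Perm
      (Astep n target as m) ∧
    SNO ((bStep bs (n : Int) target (j, merged) (m : Int)).2 ++
        bs.drop (bStep bs (n : Int) target (j, merged) (m : Int)).1) ∧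
    (∀ p ∈ (bStep bs (n : Int) target (j, merged) (m : Int)).2, p.1 ≤ (m : Int)) := by
  obtain ⟨c1, c2, c3, c4, c5⟩ := bCopy_spec bs (m : Int) bs.length j merged (by omega) hj
  set jm := bCopy bs (m : Int) j merged with hjm
  set e : Int := (m : Int) + (n : Int) with he
  have hsno' : SNO (jm.2 ++ bs.drop jm.1) := by rw [c3]; exact hsno
  have hperm' : (jm.2 ++ bs.drop jm.1).Perm as := by rw [c3]; exact hperm
  have hwf' : ∀ p ∈ jm.2 ++ bs.drop jm.1, p.1 < p.2.1 := hsno'.2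
  have hstartM : ∀ p ∈ jm.2, p.1 < (m : Int) := by
    intro p hp
    rcases c4 p hp with hmem | hle
    · exact hb p hmem
    · have := hwf' p (List.mem_append_left _ hp)
      omega
  have hsnoM : SNO jm.2 :=
    ⟨hsno'.1.sublist (List.sublist_append_left _ _),
     fun p hp => hwf' p (List.mem_append_left _ hp)⟩
  have hsnoD : SNO (bs.drop jm.1) :=
    ⟨hsno'.1.sublist (List.sublist_append_right _ _),
     fun p hp => hwf' p (List.mem_append_right _ hp)⟩
  have hdropcons : jm.1 < bs.length →
      bs.drop jm.1 = bs.getD jm.1 (0, 0, "") :: bs.drop (jm.1 + 1) := by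
    intro hlt
    rw [List.getD_eq_getElem bs _ hlt]
    exact List.drop_eq_getElem_cons hlt
  have hstartD : ∀ p ∈ bs.drop jm.1, jm.1 < bs.length → (bs.getD jm.1 (0, 0, "")).1 ≤ p.1 := by
    intro p hp hlt
    apply head_start_le (bs.getD jm.1 (0, 0, "")) (bs.drop (jm.1 + 1))
    · rw [← hdropcons hlt]; exact hsnoD
    · rw [← hdropcons hlt]; exact hp
  set P1 : Bool := (jm.1 == bs.length) || decide (e ≤ (bs.getD jm.1 (0, 0, "")).1) with hP1def
  set P2 : Bool := (match jm.2.getLast? with | none => true | some q => decide (q.2.1 ≤ (m : Int)))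
    with hP2def
  have hP1f : P1 = true → ∀ p ∈ bs.drop jm.1, e ≤ p.1 := by
    intro h1 p hp
    rcases Bool.or_eq_true_iff.mp h1 with h' | h'
    · have hjlen : jm.1 = bs.length := by simpa using h'
      rw [hjlen, List.drop_length] at hp
      cases hp
    · have hlt : jm.1 < bs.length := by
        rcases Nat.lt_or_ge jm.1 bs.length with h'' | h''
        · exact h''
        · exfalso
          have hjlen : jm.1 = bs.length := by omega
          rw [hjlen, List.drop_length] at hp
          cases hp
      exact le_trans (of_decide_eq_true h') (hstartD p hp hlt)
  have hP1r : (∀ p ∈ bs.drop jm.1, ¬((m : Int) < p.2.1 ∧ p.1 < e)) → P1 = true := by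
    intro hall
    rcases Nat.lt_or_ge jm.1 bs.length with hlt | hge
    · have hq0 : bs.getD jm.1 (0, 0, "") ∈ bs.drop jm.1 := by
        rw [hdropcons hlt]; exact List.mem_cons_self ..
      have hn0 := hall _ hq0
      have hend := c5 hlt
      rw [hP1def]
      simp only [Bool.or_eq_true, decide_eq_true_eq]
      right
      omega
    · have hjlen : jm.1 = bs.length := by omega
      rw [hP1def, hjlen]
      simp
  have hP2f : P2 = true → ∀ p ∈ jm.2, p.2.1 ≤ (m : Int) := by
    intro h2 p hp
    have hne : jm.2 ≠ [] := List.ne_nil_of_mem hp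
    rw [hP2def, List.getLast?_eq_some_getLast hne] at h2
    have hlast := of_decide_eq_true h2
    exact le_trans (end_le_getLast jm.2 hsnoM p hp hne) hlast
  have hP2r : (∀ p ∈ jm.2, ¬((m : Int) < p.2.1 ∧ p.1 < e)) → P2 = true := by
    intro hall
    rw [hP2def]
    match hgl : jm.2.getLast? with
    | none => rfl
    | some q =>
      have hq : q ∈ jm.2 := List.mem_of_getLast? hgl
      have h1 := hall q hq
      have h2 := hstartM q hq
      simp only [decide_eq_true_eq]
      omega
  have hoveq : aOverlap as (m : Int) e = aOverlap (jm.2 ++ bs.drop jm.1) (m : Int) e := by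
    unfold aOverlap
    exact (hperm'.any_eq).symm
  have hstep : bStep bs (n : Int) target (j, merged) (m : Int) =
      (if P1 && P2 then (jm.1, jm.2 ++ [((m : Int), e, target)]) else jm) := by
    rw [bStep]
  rw [hstep]
  unfold Astep
  by_cases hcond : (P1 && P2) = true
  · obtain ⟨h1, h2⟩ := Bool.and_eq_true_iff.mp hcond
    have hE := hP1f h1
    have hM := hP2f h2
    have hnoov : aOverlap (jm.2 ++ bs.drop jm.1) (m : Int) e = false := by
      unfold aOverlap
      rw [List.any_eq_false]
      intro p hp
      simp only [Bool.and_eq_true, decide_eq_true_eq, gt_iff_lt, not_and]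
      intro hcon1
      rcases List.mem_append.mp hp with h' | h'
      · exact absurd hcon1 (not_lt.mpr (hM p h'))
      · exact not_lt.mpr (hE p h')
    rw [hoveq, hnoov]
    simp only [Bool.false_eq_true, if_neg, not_false_iff, if_pos, hcond]
    have hlist : (jm.2 ++ [((m : Int), e, target)]) ++ bs.drop jm.1
        = jm.2 ++ (((m : Int), e, target) :: bs.drop jm.1) := by
      rw [List.append_assoc]; rfl
    refine ⟨c2, ?_, ?_, ?_⟩
    · rw [hlist]
      exact (List.perm_middle).trans ((hperm'.cons _).trans (List.perm_append_singleton _ _).symm)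
    · rw [hlist]
      refine ⟨?_, ?_⟩
      · rw [List.pairwise_append]
        refine ⟨hsnoM.1, ?_, ?_⟩
        · rw [List.pairwise_cons]
          refine ⟨?_, hsnoD.1⟩
          intro q hq
          exact hE q hq
        · intro p hp q hq
          rcases List.mem_cons.mp hq with rfl | hq'
          · exact hM p hp
          · have hcross := (List.pairwise_append.mp hsno'.1).2.2
            exact hcross p hp q hq'
      · intro p hp
        rcases List.mem_append.mp hp with h' | h'
        · exact hwf' p (List.mem_append_left _ h')
        · rcases List.mem_cons.mp h' with rfl | h''
          · show (m : Int) < e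
            rw [he]
            omega
          · exact hwf' p (List.mem_append_right _ h'')
    · intro p hp
      rcases List.mem_append.mp hp with h' | h'
      · exact le_of_lt (hstartM p h')
      · rw [List.mem_singleton.mp h']
  · have hov : aOverlap (jm.2 ++ bs.drop jm.1) (m : Int) e = true := by
      have hfalse : (P1 && P2) = false := Bool.eq_false_iff.mpr hcond
      rcases Bool.and_eq_false_iff.mp hfalse with h' | h'
      · by_cases hall : ∀ p ∈ bs.drop jm.1, ¬((m : Int) < p.2.1 ∧ p.1 < e)
        · exact absurd (hP1r hall) (by simp [h'])
        · push Not at hall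
          obtain ⟨p, hp, hp1, hp2⟩ := hall
          unfold aOverlap
          rw [List.any_eq_true]
          exact ⟨p, List.mem_append_right _ hp, by simp [hp1, hp2]⟩
      · by_cases hall : ∀ p ∈ jm.2, ¬((m : Int) < p.2.1 ∧ p.1 < e)
        · exact absurd (hP2r hall) (by simp [h'])
        · push Not at hall
          obtain ⟨p, hp, hp1, hp2⟩ := hall
          unfold aOverlap
          rw [List.any_eq_true]
          exact ⟨p, List.mem_append_left _ hp, by simp [hp1, hp2]⟩
    rw [hoveq, hov]
    simp only [if_pos, hcond, Bool.false_eq_true, if_neg, not_false_iff]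
    refine ⟨c2, hperm', hsno', ?_⟩
    intro p hp
    exact le_of_lt (hstartM p hp)

theorem merge_inv (bs : List (Int × Int × String)) (n : Nat) (hn : 1 ≤ n) (target : String) :
    ∀ (occs : List Nat), occs.Pairwise (· < ·) →
    ∀ (as merged : List (Int × Int × String)) (j : Nat), j ≤ bs.length →
      (merged ++ bs.drop j).Perm as → SNO (merged ++ bs.drop j) →
      (∀ p ∈ merged, ∀ s ∈ occs, p.1 < (s : Int)) →
      (occs.foldl (fun st (m : Nat) => bStep bs (n : Int) target st (m : Int)) (j, merged)).1 ≤ bs.length ∧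
      ((occs.foldl (fun st (m : Nat) => bStep bs (n : Int) target st (m : Int)) (j, merged)).2 ++
          bs.drop (occs.foldl (fun st (m : Nat) => bStep bs (n : Int) target st (m : Int)) (j, merged)).1).Perm
        (occs.foldl (Astep n target) as) ∧
      SNO ((occs.foldl (fun st (m : Nat) => bStep bs (n : Int) target st (m : Int)) (j, merged)).2 ++
          bs.drop (occs.foldl (fun st (m : Nat) => bStep bs (n : Int) target st (m : Int)) (j, merged)).1) := by
  intro occs
  induction occs with
  | nil =>
    intro _ as merged j hj hperm hsno _
    exact ⟨hj, hperm, hsno⟩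
  | cons m occs ih =>
    intro hpw as merged j hj hperm hsno hbound
    rw [List.pairwise_cons] at hpw
    obtain ⟨s1, s2, s3, s4⟩ := step_core bs n hn target m as merged j hj hperm hsno
      (fun p hp => hbound p hp m (List.mem_cons_self ..))
    rcases hst : bStep bs (n : Int) target (j, merged) (m : Int) with ⟨j', merged'⟩
    rw [hst] at s1 s2 s3 s4
    simp only [List.foldl_cons, hst]
    exact ih hpw.2 (Astep n target as m) merged' j' s1 s2 s3
      (fun p hp s hsk => lt_of_le_of_lt (s4 p hp) (by exact_mod_cast hpw.1 s hsk))

-- one candidate preserves the invariant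
theorem source_inv (text source : List Char) (target : String) (hs : source ≠ [])
    (as bs : List (Int × Int × String)) (h : SpanInv as bs) :
    SpanInv (aLoop text source target (text.length + 2) as 0) (bSource text bs source target) := by
  obtain ⟨hperm, hsno⟩ := h
  have hn : 1 ≤ source.length := List.length_pos_iff.mpr hs
  have hlenO : (occsFrom text source 0).length < text.length + 2 := by
    have h1 : (occsFrom text source 0).length ≤ (occL text source).length :=
      List.length_filter_le _ _
    have h2 : (occL text source).length ≤ (List.range text.length).length :=
      List.length_filter_le _ _
    rw [List.length_range] at h2
    omega
  rw [aLoop_eq text source target hs (text.length + 2) 0 as (by omega) hlenO]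
  unfold bSource
  have hcol : bCollect text source (text.length + 2) [] (PySem.Chars.find text source)
      = (occsFrom text source 0).map (fun (i : Nat) => (i : Int)) := by
    have hb := bCollect_eq text source hs (text.length + 2) 0 [] (by omega) hlenO
    rw [Nat.cast_zero, PySem.Chars.findFrom_zero, List.nil_append] at hb
    exact hb
  rw [hcol]
  show SpanInv (List.foldl (Astep source.length target) as (occsFrom text source 0))
    ((List.foldl (bStep bs ((source.length : Nat) : Int) target) (0, [])
        ((occsFrom text source 0).map (fun (i : Nat) => (i : Int)))).2 ++
      bs.drop (List.foldl (bStep bs ((source.length : Nat) : Int) target) (0, [])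
        ((occsFrom text source 0).map (fun (i : Nat) => (i : Int)))).1)
  rw [List.foldl_map]
  have hpw : (occsFrom text source 0).Pairwise (· < ·) :=
    (occL_pairwise text source).filter _
  obtain ⟨m1, m2, m3⟩ := merge_inv bs source.length hn target (occsFrom text source 0) hpw
    as [] 0 (by omega) (by simpa using hperm) (by simpa using hsno)
    (fun p hp => absurd hp (List.not_mem_nil))
  exact ⟨m2, m3⟩

theorem foldl_inv (text : List Char) :
    ∀ (cand : List (String × String)) (as bs : List (Int × Int × String)),
      (∀ p ∈ cand, p.1 ≠ "") → SpanInv as bs →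
      SpanInv (cand.foldl (fun sp p => aLoop text p.1.toList p.2 (text.length + 2) sp 0) as)
              (cand.foldl (fun sp p => bSource text sp p.1.toList p.2) bs) := by
  intro cand
  induction cand with
  | nil => intro as bs _ h; exact h
  | cons c cand ih =>
    intro as bs hne hInv
    simp only [List.foldl_cons]
    apply ih _ _ (fun p hp => hne p (List.mem_cons_of_mem _ hp))
    apply source_inv
    · intro h
      exact hne c (List.mem_cons_self ..) (String.toList_eq_nil_iff.mp h)
    · exact hInv

theorem insertBy_congr {α : Type} (p q : α → α → Bool) (x : α) (ys : List α)
    (h : ∀ y ∈ ys, p x y = q x y) : PySem.List.insertBy p x ys = PySem.List.insertBy q x ys := by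
  induction ys with
  | nil => rfl
  | cons y ys ih =>
    simp only [PySem.List.insertBy]
    rw [h y (List.mem_cons_self ..)]
    by_cases hq : q x y = true
    · simp [hq]
    · simp only [Bool.not_eq_true] at hq
      simp [hq, ih (fun z hz => h z (List.mem_cons_of_mem _ hz))]

theorem foldl_insertBy_congr {α : Type} (p q : α → α → Bool) :
    ∀ (xs acc : List α), (∀ a b, (a ∈ xs ∨ a ∈ acc) → (b ∈ xs ∨ b ∈ acc) → p a b = q a b) →
      xs.foldl (fun acc x => PySem.List.insertBy p x acc) acc
        = xs.foldl (fun acc x => PySem.List.insertBy q x acc) acc := by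
  intro xs
  induction xs with
  | nil => intro acc _; rfl
  | cons x xs ih =>
    intro acc h
    simp only [List.foldl_cons]
    rw [insertBy_congr p q x acc (fun y hy => h x y (Or.inl (List.mem_cons_self ..)) (Or.inr hy))]
    apply ih
    intro a b ha hb
    apply h a b
    · rcases ha with ha | ha
      · exact Or.inl (List.mem_cons_of_mem _ ha)
      · rcases (PySem.List.mem_insertBy ..).mp ha with h' | h'
        · exact Or.inl (h' ▸ List.mem_cons_self ..)
        · exact Or.inr h'
    · rcases hb with hb | hb
      · exact Or.inl (List.mem_cons_of_mem _ hb)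
      · rcases (PySem.List.mem_insertBy ..).mp hb with h' | h'
        · exact Or.inl (h' ▸ List.mem_cons_self ..)
        · exact Or.inr h'

theorem final_eq (as bs : List (Int × Int × String)) (hInv : SpanInv as bs) :
    PySem.List.sorted2 as (fun x => x.1) (fun x => x.2.1) false = bs := by
  obtain ⟨hperm, hp, hwf⟩ := hInv
  have hstrict : bs.Pairwise (fun p q => p.1 < q.1) := by
    rw [List.pairwise_iff_getElem] at hp ⊢
    intro i j hi hj hij
    exact lt_of_lt_of_le (hwf bs[i] (bs.getElem_mem hi)) (hp i j hi hj hij)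
  have hagree : ∀ a ∈ as, ∀ b ∈ as, a.1 = b.1 → a = b := by
    intro a ha b hb hab
    rw [← hperm.mem_iff] at ha hb
    obtain ⟨i, hi, rfl⟩ := List.getElem_of_mem ha
    obtain ⟨j, hj, rfl⟩ := List.getElem_of_mem hb
    rw [List.pairwise_iff_getElem] at hstrict
    rcases Nat.lt_trichotomy i j with h' | h' | h'
    · exact absurd hab (ne_of_lt (hstrict i j hi hj h'))
    · subst h'; rfl
    · exact absurd hab.symm (ne_of_lt (hstrict j i hj hi h'))
  have hsplit : PySem.List.sorted2 as (fun x => x.1) (fun x => x.2.1) false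
      = PySem.List.sorted as (fun x => x.1) false := by
    show as.foldl (fun acc x => PySem.List.insertBy _ x acc) []
        = as.foldl (fun acc x => PySem.List.insertBy _ x acc) []
    apply foldl_insertBy_congr
    intro a b ha hb
    simp only [List.mem_nil_iff, or_false] at ha hb
    rcases Int.lt_trichotomy a.1 b.1 with h' | h' | h'
    · simp [h']
    · have hab : a = b := hagree a ha b hb h'
      subst hab
      simp
    · simp [h', not_lt.mpr (le_of_lt h')]
  rw [hsplit]
  exact PySem.List.sorted_eq_of_perm_of_pairwise_lt as bs (fun x => x.1) hperm hstrict

-- ===== VERDICT (by name: the statement is the Claim_ definition above) =====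
theorem find_replacement_spans_py_spec : Claim_equal_find_replacement_spans_py := by
  unfold Claim_equal_find_replacement_spans_py
  intro text replacements _
  simp only [Spec_find_replacement_spans_py, find_replacement_spans_py, find_replacement_spans_py_alt]
  have hc : ∀ p ∈ PySem.List.sorted (replacements.filter (fun p => !(p.1 == ""))) (fun p => PySem.Str.len p.1) true, p.1 ≠ "" := by
    intro p hp
    rw [PySem.List.mem_sorted] at hp
    have := (List.mem_filter.mp hp).2
    simpa using this
  have h0 : SpanInv [] [] := ⟨List.Perm.refl _, List.Pairwise.nil, by simp⟩
  have h := foldl_inv text.toList _ [] [] hc h0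
  exact (final_eq _ _ h).symm ▸ rfl
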